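-- pv_equiv track=rewrite | github.com/aortega0703/competitive-programming-solutions | HackerRank/projecteuler/euler113.py | dp_dec
-- ===== SOURCE A (Python) =====
-- mod = 10**9 + 7
--
-- def dp_dec(len_N, memo):
--     old_memo_len = len(memo)
--     # [is_nonzero][is_tight][last_digit][index]
--     for _ in range(old_memo_len, len_N + 1):
--         memo.append([0] * 10)
--     if old_memo_len == 0:
--         for d in range(10):
--             memo[0][d] = 1
--
--     for i in range(max(1, old_memo_len), len_N + 1):
--         for d in range(10):
--             for next_d in range(0, d + 1):
--                 memo[i][d] += memo[i - 1][next_d]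
--                 memo[i][d] %= mod
--
--     ans = 0
--     for i in range(len_N + 1):
--         ans += memo[i][9] - 1
--         ans %= mod
--     return ans
-- ===== SOURCE B (Python) =====
-- # Closed form: each generated row entry is a binomial-weighted combination of the
-- # seed row (entries of the j-th power of the lower-triangular ones matrix are
-- # binomial coefficients), so B never builds the DP table; return-value equivalent
-- # to A (A also extends `memo` in place; B does not mutate it).
-- from math import comb
--
-- mod = 10**9 + 7
--
-- def dp_dec(len_N, memo):
--     n = len(memo)
--     ans = 0
--     for i in range(min(n, len_N + 1)):
--         ans += memo[i][9] - 1
--     if n == 0: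
--         prev = [1] * 10
--         if len_N >= 0:
--             ans += prev[9] - 1
--         start = 1
--     else:
--         prev = memo[n - 1]
--         start = n
--     for j in range(1, len_N + 1 - start + 1):
--         row9 = sum(comb(j + 8 - e, 9 - e) * prev[e] for e in range(10)) % mod
--         ans += row9 - 1
--     return ans % mod
-- ===== Notes on version B (the rewrite author's own statement) =====
-- stated objective: alternative
-- what changed: Replaces A's row-by-row DP table (triple-nested loop filling memo and then summing column 9) with a closed form: the transition matrix's j-th power has binomial-coefficient entries, so each new row's column-9 value is computed directly as sum(comb(j+8-e,9-e)*prev[e]) mod p from the last cached row, and no table is built; B does not mutate memo (A extends its cache in place), so the equivalence is about the return value.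
import Mathlib
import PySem

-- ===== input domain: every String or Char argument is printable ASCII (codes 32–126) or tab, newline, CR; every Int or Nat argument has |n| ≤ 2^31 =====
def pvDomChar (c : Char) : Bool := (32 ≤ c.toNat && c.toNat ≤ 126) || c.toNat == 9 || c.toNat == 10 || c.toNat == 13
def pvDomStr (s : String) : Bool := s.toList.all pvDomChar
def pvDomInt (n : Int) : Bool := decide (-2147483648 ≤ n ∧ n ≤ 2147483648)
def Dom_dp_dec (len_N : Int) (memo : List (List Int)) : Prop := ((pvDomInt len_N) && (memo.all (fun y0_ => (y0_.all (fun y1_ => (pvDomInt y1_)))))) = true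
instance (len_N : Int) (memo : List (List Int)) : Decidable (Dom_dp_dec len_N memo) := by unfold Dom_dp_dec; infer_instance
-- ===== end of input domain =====

-- B replaces A's row-by-row DP table by a closed form: the j-th power of the DP's
-- lower-triangular all-ones transition matrix has binomial-coefficient entries, so each
-- generated row's column-9 value is a binomial-weighted sum of the seed row; B does not
-- mutate `memo` (A extends it in place), so the equivalence proved is about the RETURN value.

-- ===== PORT A =====
def pvMod : Int := 1000000007

-- memo[i][d] read/write with Python index semantics (indices are in range under Pre_)
def pvGet2 (m : List (List Int)) (i d : Int) : Int :=
  PySem.List.pyGetD (PySem.List.pyGetD m i []) d 0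

def pvSet2 (m : List (List Int)) (i d v : Int) : List (List Int) :=
  PySem.List.pySetD m i (PySem.List.pySetD (PySem.List.pyGetD m i []) d v)

def dp_dec (len_N : Int) (memo : List (List Int)) : Int :=
  let old : Int := PySem.List.len memo
  let memo1 := (PySem.List.pyRange old (len_N + 1) 1).foldl
      (fun m _ => m ++ [List.replicate 10 (0:Int)]) memo
  let memo2 := if old = 0 then
      (PySem.List.pyRange 0 10 1).foldl (fun m d => pvSet2 m 0 d 1) memo1
    else memo1
  let memo3 := (PySem.List.pyRange (max 1 old) (len_N + 1) 1).foldl (fun m i =>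
      (PySem.List.pyRange 0 10 1).foldl (fun m d =>
        (PySem.List.pyRange 0 (d + 1) 1).foldl (fun m next_d =>
          let m1 := pvSet2 m i d (pvGet2 m i d + pvGet2 m (i - 1) next_d)
          pvSet2 m1 i d (PySem.Int.mod (pvGet2 m1 i d) pvMod)) m) m) memo2
  (PySem.List.pyRange 0 (len_N + 1) 1).foldl (fun ans i =>
    PySem.Int.mod (ans + (pvGet2 memo3 i 9 - 1)) pvMod) 0

-- ===== PORT B =====
-- Source B: closed form; math.comb(n, k) = Nat.choose (arguments are ≥ 0 at every call site here)
def dp_dec_alt (len_N : Int) (memo : List (List Int)) : Int :=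
  let n : Int := PySem.List.len memo
  let ans0 : Int := (PySem.List.pyRange 0 (min n (len_N + 1)) 1).foldl
      (fun a i => a + (PySem.List.pyGetD (PySem.List.pyGetD memo i []) 9 0 - 1)) 0
  let st : Int × List Int × Int :=
    if n = 0 then
      let prev := List.replicate 10 (1:Int)
      ((if 0 ≤ len_N then ans0 + (PySem.List.pyGetD prev 9 0 - 1) else ans0), prev, 1)
    else (ans0, PySem.List.pyGetD memo (n - 1) [], n)
  let ans := (PySem.List.pyRange 1 (len_N + 1 - st.2.2 + 1) 1).foldl
      (fun a j =>
        let row9 := PySem.Int.mod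
          ((PySem.List.pyRange 0 10 1).foldl
            (fun s e => s + ((j + 8 - e).toNat.choose (9 - e).toNat : Int)
                            * PySem.List.pyGetD st.2.1 e 0) 0)
          pvMod
        a + (row9 - 1)) st.1
  PySem.Int.mod ans pvMod

-- ===== PRECONDITION & SPEC =====
-- Pre_ is exactly where the Python A returns: every row at an index ≤ len_N must have ≥ 10 digits
-- (the final loop reads memo[i][9] for all i ≤ len_N), and an empty memo needs len_N ≥ 0
-- (otherwise the base-row write memo[0][d] = 1 is an IndexError).
def Pre_dp_dec (len_N : Int) (memo : List (List Int)) : Prop :=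
  (memo = [] → 0 ≤ len_N) ∧
  ∀ p ∈ PySem.List.enumerate memo 0, p.1 ≤ len_N → 10 ≤ p.2.length

instance (len_N : Int) (memo : List (List Int)) : Decidable (Pre_dp_dec len_N memo) := by
  unfold Pre_dp_dec; infer_instance

def pvWitness_dp_dec : Int × List (List Int) := (2, [])

def Spec_dp_dec (len_N : Int) (memo : List (List Int)) (out : Int) : Prop := out = dp_dec_alt len_N memo
instance (len_N : Int) (memo : List (List Int)) (out : Int) : Decidable (Spec_dp_dec len_N memo out) := by
  unfold Spec_dp_dec; infer_instance

-- ===== CLAIM (what is proved, stated in full; the proofs are below) =====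
def Claim_equal_dp_dec : Prop := ∀ (len_N : Int) (memo : List (List Int)), Dom_dp_dec len_N memo → Pre_dp_dec len_N memo → Spec_dp_dec len_N memo (dp_dec len_N memo)

-- ===== LEMMAS AND PROOFS =====

def pvZero : List Int := List.replicate 10 0

-- running sums (the row-step of A's DP, as a proof-side model)
def pvAccumulate (acc : Int) : List Int → List Int
  | [] => []
  | x :: xs => (acc + x) :: pvAccumulate (acc + x) xs

def pvNextR (prev : List Int) : List Int :=
  (pvAccumulate 0 (prev.take 10)).map (fun s => PySem.Int.mod s pvMod)

theorem pv_mcollapse (a b : Int) :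
    PySem.Int.mod (PySem.Int.mod a pvMod + b) pvMod = PySem.Int.mod (a + b) pvMod := by
  have h : (0:Int) < pvMod := by decide
  simp [PySem.Int.mod_eq_emod_of_pos h, Int.emod_add_emod]

theorem pv_getD_set_self (r : List Int) (d : Nat) (hd : d < r.length) (v : Int) :
    (r.set d v).getD d 0 = v := by
  simp [List.getD, hd, getElem?_pos]

theorem pv_inner (g : Int → Int) (d : Nat) (nds : List Int) :
    ∀ (r : List Int), d < r.length →
    nds.foldl (fun r nd =>
        let r1 := PySem.List.pySetD r (d : Int) (PySem.List.pyGetD r (d : Int) 0 + g nd)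
        PySem.List.pySetD r1 (d : Int) (PySem.Int.mod (PySem.List.pyGetD r1 (d : Int) 0) pvMod)) r
    = PySem.List.pySetD r (d : Int)
        (nds.foldl (fun v nd => PySem.Int.mod (v + g nd) pvMod) (PySem.List.pyGetD r (d : Int) 0)) := by
  induction nds with
  | nil =>
    intro r hd
    simp only [List.foldl_nil, PySem.List.pySetD_natCast, PySem.List.pyGetD_natCast, List.getD]
    rw [List.getElem?_eq_getElem hd]
    simp
  | cons nd nds ih =>
    intro r hd
    simp only [List.foldl_cons]
    have hstep : (let r1 := PySem.List.pySetD r (d : Int) (PySem.List.pyGetD r (d : Int) 0 + g nd)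
        PySem.List.pySetD r1 (d : Int) (PySem.Int.mod (PySem.List.pyGetD r1 (d : Int) 0) pvMod))
        = PySem.List.pySetD r (d : Int)
            (PySem.Int.mod (PySem.List.pyGetD r (d : Int) 0 + g nd) pvMod) := by
      simp only [PySem.List.pySetD_natCast, PySem.List.pyGetD_natCast]
      rw [pv_getD_set_self r d hd, List.set_set]
    rw [hstep, ih _ (by simpa using hd)]
    simp only [PySem.List.pySetD_natCast, PySem.List.pyGetD_natCast]
    rw [pv_getD_set_self r d hd, List.set_set]

theorem pv_foldmod (g : Int → Int) (l : List Int) :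
    ∀ a : Int, l.foldl (fun v nd => PySem.Int.mod (v + g nd) pvMod) (PySem.Int.mod a pvMod)
    = PySem.Int.mod (l.foldl (fun v nd => v + g nd) a) pvMod := by
  induction l with
  | nil => intro a; simp
  | cons x l ih => intro a; simp only [List.foldl_cons, pv_mcollapse]; exact ih (a + g x)

theorem pv_accum (t : List Int) : ∀ a : Int,
    pvAccumulate a t = (List.range t.length).map (fun k => (t.take (k+1)).foldl (· + ·) a) := by
  induction t with
  | nil => intro a; simp [pvAccumulate]
  | cons x xs ih =>
    intro a
    simp only [pvAccumulate, List.length_cons, List.range_succ_eq_map, List.map_cons, List.map_map]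
    rw [ih (a + x)]
    simp only [List.cons.injEq]
    refine ⟨by simp, ?_⟩
    apply List.map_congr_left
    intro k _
    simp [Function.comp, List.take_succ_cons]

theorem pv_foldmod0 (g : Int → Int) (l : List Int) :
    l.foldl (fun v nd => PySem.Int.mod (v + g nd) pvMod) 0
    = PySem.Int.mod (l.foldl (fun v nd => v + g nd) 0) pvMod := by
  have h := pv_foldmod g l 0
  rwa [show PySem.Int.mod 0 pvMod = 0 from by decide] at h

theorem pv_outer (g : Int → Int) : ∀ n : Nat, n ≤ 10 →
    (List.range n).foldl (fun r (k : Nat) =>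
      (PySem.List.pyRange 0 ((k:Int) + 1) 1).foldl (fun r nd =>
        let r1 := PySem.List.pySetD r (k : Int) (PySem.List.pyGetD r (k : Int) 0 + g nd)
        PySem.List.pySetD r1 (k : Int) (PySem.Int.mod (PySem.List.pyGetD r1 (k : Int) 0) pvMod)) r)
      pvZero
    = (List.range n).map (fun (k : Nat) =>
        PySem.Int.mod ((PySem.List.pyRange 0 ((k:Int) + 1) 1).foldl (fun v nd => v + g nd) 0) pvMod)
      ++ List.replicate (10 - n) 0 := by
  intro n
  induction n with
  | zero => intro _; simp [pvZero]
  | succ n ih =>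
    intro hn
    rw [List.range_succ, List.foldl_append, List.map_append, ih (by omega)]
    simp only [List.foldl_cons, List.foldl_nil]
    have hrep : List.replicate (10 - n) (0:Int) = 0 :: List.replicate (10 - (n+1)) 0 := by
      rw [show 10 - n = (10 - (n+1)) + 1 by omega]; rfl
    rw [hrep]
    set M := (List.range n).map (fun (k : Nat) =>
        PySem.Int.mod ((PySem.List.pyRange 0 ((k:Int) + 1) 1).foldl (fun v nd => v + g nd) 0) pvMod) with hM
    have hMlen : M.length = n := by simp [hM]
    have hlen : n < (M ++ 0 :: List.replicate (10 - (n+1)) (0:Int)).length := by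
      simp [hMlen]
    rw [pv_inner g n _ _ hlen]
    have hget : PySem.List.pyGetD (M ++ 0 :: List.replicate (10 - (n+1)) (0:Int)) (n : Int) 0 = 0 := by
      simp [PySem.List.pyGetD_natCast, List.getD, hMlen]
    rw [hget, pv_foldmod0]
    simp only [PySem.List.pySetD_natCast, List.set_append, hMlen]
    simp

theorem pv_take_getD (prev : List Int) (j : Nat) (hj : j < 10) :
    (prev.take 10).getD j 0 = prev.getD j 0 := by
  simp [List.getD, hj]

theorem pv_rangefold (t : List Int) : ∀ (k : Nat), k ≤ t.length → ∀ a : Int,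
    (List.range k).foldl (fun v j => v + t.getD j 0) a
    = (t.take k).foldl (· + ·) a := by
  intro k
  induction k with
  | zero => intro _ a; simp
  | succ k ih =>
    intro hk a
    rw [List.range_succ, List.foldl_append, ih (by omega)]
    rw [List.take_add_one]
    have h1 : t[k]? = some (t.getD k 0) := by
      rw [List.getElem?_eq_getElem (show k < t.length by omega)]
      simp [List.getD, List.getElem?_eq_getElem (show k < t.length by omega)]
    rw [h1]
    simp

theorem pv_rowA (prev : List Int) (hlen : 10 ≤ prev.length) :
    (PySem.List.pyRange 0 10 1).foldl (fun r d =>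
      (PySem.List.pyRange 0 (d + 1) 1).foldl (fun r nd =>
        let r1 := PySem.List.pySetD r d (PySem.List.pyGetD r d 0 + PySem.List.pyGetD prev nd 0)
        PySem.List.pySetD r1 d (PySem.Int.mod (PySem.List.pyGetD r1 d 0) pvMod)) r)
      pvZero = pvNextR prev := by
  have h10 : PySem.List.pyRange 0 10 1 = (List.range 10).map (fun (k : Nat) => (k : Int)) := by
    rw [show (10:Int) = ((10:Nat):Int) by norm_cast, PySem.List.pyRange_zero_nat]
  rw [h10, List.foldl_map, pv_outer (fun nd => PySem.List.pyGetD prev nd 0) 10 le_rfl]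
  have htlen : (prev.take 10).length = 10 := by simp; omega
  rw [pvNextR, pv_accum, htlen, List.map_map]
  simp only [Nat.sub_self, List.replicate_zero, List.append_nil]
  apply List.map_congr_left
  intro k hk
  have hk10 : k < 10 := List.mem_range.mp hk
  have hr : PySem.List.pyRange 0 ((k:Int) + 1) 1 = (List.range (k+1)).map (fun (j : Nat) => (j : Int)) := by
    rw [show ((k:Int) + 1) = (((k+1:Nat)):Int) by push_cast; ring, PySem.List.pyRange_zero_nat]
  rw [hr, List.foldl_map]
  simp only [PySem.List.pyGetD_natCast]
  have hcong : (List.range (k+1)).foldl (fun v (j:Nat) => v + prev.getD j 0) 0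
      = (List.range (k+1)).foldl (fun v (j:Nat) => v + (prev.take 10).getD j 0) 0 := by
    apply PySem.List.foldl_congr_mem
    intro acc j hj
    rw [pv_take_getD prev j (by have := List.mem_range.mp hj; omega)]
  rw [hcong, pv_rangefold (prev.take 10) (k+1) (by rw [htlen]; omega) 0]
  simp [Function.comp, List.take_take, Nat.min_eq_left (by omega : k+1 ≤ 10)]

def pvGen (prev : List Int) : Nat → List (List Int)
  | 0 => []
  | k+1 => pvNextR prev :: pvGen (pvNextR prev) k

theorem pv_frame (ds : List Int) (step : List (List Int) → Int → List (List Int))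
    (stepR : List Int → Int → List Int) (P S : List (List Int))
    (h : ∀ r d, d ∈ ds → step (P ++ r :: S) d = P ++ stepR r d :: S) :
    ∀ r : List Int, ds.foldl step (P ++ r :: S) = P ++ ds.foldl stepR r :: S := by
  induction ds with
  | nil => intro r; simp
  | cons d ds ih =>
    intro r
    simp only [List.foldl_cons, h r d (by simp)]
    exact ih (fun r e he => h r e (by simp [he])) _

theorem pvGet2_mid (P S : List (List Int)) (r : List Int) (d : Int) :
    pvGet2 (P ++ r :: S) (P.length : Int) d = PySem.List.pyGetD r d 0 := by
  simp [pvGet2]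

theorem pvSet2_mid (P S : List (List Int)) (r : List Int) (d v : Int) :
    pvSet2 (P ++ r :: S) (P.length : Int) d v = P ++ PySem.List.pySetD r d v :: S := by
  simp [pvSet2]

theorem pvGet2_prev' (Q S : List (List Int)) (g r : List Int) (nd : Int) :
    pvGet2 ((Q ++ [g]) ++ r :: S) (((Q ++ [g]).length : Int) - 1) nd
    = PySem.List.pyGetD g nd 0 := by
  have hc : (((Q ++ [g]).length : Int) - 1) = (Q.length : Int) := by simp
  rw [hc, List.append_assoc, List.singleton_append]
  exact pvGet2_mid Q (r :: S) g nd

theorem pvGet2_prev (P S : List (List Int)) (r : List Int) (hP : P ≠ []) (nd : Int) :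
    pvGet2 (P ++ r :: S) ((P.length : Int) - 1) nd = PySem.List.pyGetD (P.getLast hP) nd 0 := by
  conv_lhs => rw [← List.dropLast_append_getLast hP]
  exact pvGet2_prev' P.dropLast S (P.getLast hP) r nd

theorem pv_nextR_len (prev : List Int) : (pvNextR prev).length = min 10 prev.length := by
  rw [pvNextR, pv_accum]
  simp

theorem pv_step_mid (P S : List (List Int)) (hP : P ≠ []) (r : List Int) (d : Int)
    (_hd : d ∈ PySem.List.pyRange 0 10 1) :
    (PySem.List.pyRange 0 (d + 1) 1).foldl (fun m next_d =>
        let m1 := pvSet2 m ((P.length : Int)) d (pvGet2 m ((P.length : Int)) d + pvGet2 m (((P.length : Int)) - 1) next_d)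
        pvSet2 m1 ((P.length : Int)) d (PySem.Int.mod (pvGet2 m1 ((P.length : Int)) d) pvMod)) (P ++ r :: S)
    = P ++ ((PySem.List.pyRange 0 (d + 1) 1).foldl (fun r nd =>
        let r1 := PySem.List.pySetD r d (PySem.List.pyGetD r d 0 + PySem.List.pyGetD (P.getLast hP) nd 0)
        PySem.List.pySetD r1 d (PySem.Int.mod (PySem.List.pyGetD r1 d 0) pvMod)) r) :: S := by
  apply pv_frame
  intro r' nd _
  simp only []
  rw [pvGet2_mid, pvGet2_prev P S r' hP nd, pvSet2_mid, pvGet2_mid, pvSet2_mid]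

theorem pv_dp_fold (k : Nat) : ∀ (P : List (List Int)) (hP : P ≠ [])
    (_hlen : 10 ≤ (P.getLast hP).length),
    (PySem.List.pyRange (P.length : Int) ((P.length : Int) + (k : Int)) 1).foldl (fun m i =>
      (PySem.List.pyRange 0 10 1).foldl (fun m d =>
        (PySem.List.pyRange 0 (d + 1) 1).foldl (fun m next_d =>
          let m1 := pvSet2 m i d (pvGet2 m i d + pvGet2 m (i - 1) next_d)
          pvSet2 m1 i d (PySem.Int.mod (pvGet2 m1 i d) pvMod)) m) m)
      (P ++ List.replicate k pvZero)
    = P ++ pvGen (P.getLast hP) k := by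
  induction k with
  | zero =>
    intro P hP hlen
    rw [PySem.List.pyRange_one_eq_nil (show (P.length:Int) + ((0:Nat):Int) ≤ (P.length:Int) from by push_cast; omega)]
    simp [pvGen]
  | succ k ih =>
    intro P hP hlen
    rw [PySem.List.pyRange_one_cons (show (P.length:Int) < (P.length:Int) + (((k+1):Nat):Int) from by push_cast; omega)]
    simp only [List.foldl_cons]
    rw [show List.replicate (k+1) pvZero = pvZero :: List.replicate k pvZero from rfl]
    have houter := pv_frame (PySem.List.pyRange 0 10 1)
      (fun m d =>
        (PySem.List.pyRange 0 (d + 1) 1).foldl (fun m next_d =>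
          let m1 := pvSet2 m ((P.length : Int)) d (pvGet2 m ((P.length : Int)) d + pvGet2 m (((P.length : Int)) - 1) next_d)
          pvSet2 m1 ((P.length : Int)) d (PySem.Int.mod (pvGet2 m1 ((P.length : Int)) d) pvMod)) m)
      (fun r d =>
        (PySem.List.pyRange 0 (d + 1) 1).foldl (fun r nd =>
          let r1 := PySem.List.pySetD r d (PySem.List.pyGetD r d 0 + PySem.List.pyGetD (P.getLast hP) nd 0)
          PySem.List.pySetD r1 d (PySem.Int.mod (PySem.List.pyGetD r1 d 0) pvMod)) r)
      P (List.replicate k pvZero)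
      (fun r d hd => pv_step_mid P (List.replicate k pvZero) hP r d hd) pvZero
    rw [houter, pv_rowA (P.getLast hP) hlen]
    have hlast : (P ++ [pvNextR (P.getLast hP)]).getLast (by simp) = pvNextR (P.getLast hP) := by
      simp
    have hne : (P ++ [pvNextR (P.getLast hP)]) ≠ [] := by simp
    have ihs := ih (P ++ [pvNextR (P.getLast hP)]) hne
      (by rw [hlast, pv_nextR_len]; exact le_min (by norm_num) hlen)
    rw [hlast] at ihs
    have hc1 : ((P.length : Int) + 1) = (((P ++ [pvNextR (P.getLast hP)]).length : Int)) := by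
      simp
    have hc2 : ((P.length : Int) + (((k + 1 : Nat)) : Int)) = (((P ++ [pvNextR (P.getLast hP)]).length : Int) + (k : Int)) := by
      simp only [List.length_append, List.length_cons, List.length_nil]; push_cast; ring
    rw [hc2, hc1, show P ++ pvNextR (P.getLast hP) :: List.replicate k pvZero
        = (P ++ [pvNextR (P.getLast hP)]) ++ List.replicate k pvZero from by simp, ihs]
    simp [pvGen]

theorem pv_appendconst : ∀ (l : List Int) (init : List (List Int)),
    l.foldl (fun m _ => m ++ [List.replicate 10 (0:Int)]) init = init ++ List.replicate l.length pvZero := by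
  intro l
  induction l with
  | nil => intro init; simp
  | cons x l ih =>
    intro init
    rw [List.foldl_cons, ih, List.length_cons]
    simp only [List.replicate_succ, pvZero, List.append_assoc, List.singleton_append]

theorem pv_sumfold (X : List Int) : ∀ (a : Int),
    X.foldl (fun acc v => PySem.Int.mod (acc + (v - 1)) pvMod) (PySem.Int.mod a pvMod)
    = PySem.Int.mod (a + X.sum - X.length) pvMod := by
  induction X with
  | nil => intro a; simp
  | cons v X ih =>
    intro a
    simp only [List.foldl_cons, pv_mcollapse, List.sum_cons, List.length_cons]
    rw [ih (a + (v - 1))]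
    congr 1
    push_cast
    ring

theorem pv_sum0 (X : List Int) :
    X.foldl (fun acc v => PySem.Int.mod (acc + (v - 1)) pvMod) 0
    = PySem.Int.mod (X.sum - X.length) pvMod := by
  have h := pv_sumfold X 0
  rw [show PySem.Int.mod 0 pvMod = 0 from by decide] at h
  simpa using h

theorem pv_finalA (M : List (List Int)) (n : Nat) (hn : n ≤ M.length) :
    (PySem.List.pyRange 0 ((n : Nat) : Int) 1).foldl
      (fun ans i => PySem.Int.mod (ans + (pvGet2 M i 9 - 1)) pvMod) 0
    = PySem.Int.mod (((M.take n).map (fun r => PySem.List.pyGetD r 9 0)).sum - n) pvMod := by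
  have hcong : (PySem.List.pyRange 0 ((n : Nat) : Int) 1).foldl
      (fun ans i => PySem.Int.mod (ans + (pvGet2 M i 9 - 1)) pvMod) 0
      = (PySem.List.pyRange 0 ((n : Nat) : Int) 1).foldl
      (fun ans i => PySem.Int.mod (ans + (PySem.List.pyGetD (PySem.List.pyGetD (M.take n) i []) 9 0 - 1)) pvMod) 0 := by
    apply PySem.List.foldl_congr_mem
    intro acc i hi
    have hi' := (PySem.List.mem_pyRange_one).mp hi
    have h0 : PySem.List.pyGetD M i [] = PySem.List.pyGetD (M.take n) i [] := by
      rw [PySem.List.pyGetD_of_nonneg M ([] : List Int) hi'.1, PySem.List.pyGetD_of_nonneg (M.take n) ([] : List Int) hi'.1]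
      have : i.toNat < n := by omega
      simp [List.getD, this]
    rw [pvGet2, h0]
  rw [hcong]
  have hlen : ((n : Nat) : Int) = ((M.take n).length : Int) := by
    simp [List.length_take]; omega
  rw [hlen]
  rw [PySem.List.foldl_pyRange_zero_pyGetD' (M.take n) ([] : List Int)
    (fun ans r => PySem.Int.mod (ans + (PySem.List.pyGetD r 9 0 - 1)) pvMod) 0]
  rw [← List.foldl_map (f := fun r => PySem.List.pyGetD r 9 0)
    (g := fun acc v => PySem.Int.mod (acc + (v - 1)) pvMod), pv_sum0]
  simp [List.length_take]

theorem pv_gen_len (k : Nat) : ∀ g : List Int, (pvGen g k).length = k := by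
  induction k with
  | zero => intro g; rfl
  | succ k ih => intro g; simp [pvGen, ih]

-- ========= B-side: closed-form characterization of the generated rows =========

-- the closed form: S prev t d = sum over e ≤ d of C(t+d-e, d-e) * prev[e]
def pvS (prev : List Int) (t d : Nat) : Int :=
  ∑ e ∈ Finset.range (d + 1), ((t + d - e).choose (d - e) : Int) * prev.getD e 0

def pvPow (prev : List Int) : Nat → List Int
  | 0 => pvNextR prev
  | t+1 => pvNextR (pvPow prev t)

theorem pv_pow_len (prev : List Int) (hp : 10 ≤ prev.length) (t : Nat) :
    (pvPow prev t).length = 10 := by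
  induction t with
  | zero => rw [pvPow, pv_nextR_len]; omega
  | succ t ih => rw [pvPow, pv_nextR_len, ih]; simp

theorem pv_pow_next (prev : List Int) : ∀ t : Nat, pvPow (pvNextR prev) t = pvPow prev (t+1) := by
  intro t
  induction t with
  | zero => rfl
  | succ t ih => show pvNextR (pvPow (pvNextR prev) t) = _; rw [ih]; rfl

theorem pv_gen_eq_pow : ∀ (k : Nat) (g : List Int), pvGen g k = (List.range k).map (pvPow g) := by
  intro k
  induction k with
  | zero => intro g; rfl
  | succ k ih =>
    intro g
    rw [pvGen, ih (pvNextR g), List.range_succ_eq_map, List.map_cons, List.map_map]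
    simp only [List.cons.injEq]
    refine ⟨rfl, List.map_congr_left (fun t _ => ?_)⟩
    show pvPow (pvNextR g) t = pvPow g (t+1)
    exact pv_pow_next g t

theorem pv_list_range_sum (h : Nat → Int) : ∀ n : Nat,
    ((List.range n).map h).sum = ∑ t ∈ Finset.range n, h t := by
  intro n
  induction n with
  | zero => simp
  | succ n ih => rw [List.range_succ, List.map_append, List.sum_append, Finset.sum_range_succ, ih]; simp

theorem pv_foldl_sum (t : List Int) : ∀ (k : Nat), k ≤ t.length →
    (t.take k).foldl (· + ·) 0 = ∑ e ∈ Finset.range k, t.getD e 0 := by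
  intro k hk
  rw [← pv_rangefold t k hk 0]
  have := pv_list_range_sum (fun e => t.getD e 0) k
  rw [← this]
  rw [← List.foldl_map (f := fun e => t.getD e 0) (g := fun (v : Int) x => v + x)]
  rw [List.sum_eq_foldl]

-- entry d of one row step: prefix sum mod p
theorem pv_nextR_getD (r : List Int) (hr : 10 ≤ r.length) (d : Nat) (hd : d < 10) :
    (pvNextR r).getD d 0 = PySem.Int.mod (∑ e ∈ Finset.range (d + 1), r.getD e 0) pvMod := by
  have htlen : (r.take 10).length = 10 := by simp; omega
  rw [pvNextR, pv_accum, htlen]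
  rw [List.map_map]
  have hd' : d < ((List.range 10).map ((fun s => PySem.Int.mod s pvMod) ∘
      fun k => ((r.take 10).take (k+1)).foldl (· + ·) 0)).length := by simp [hd]
  rw [List.getD, List.getElem?_eq_getElem hd']
  simp only [Option.getD_some, List.getElem_map, List.getElem_range, Function.comp]
  rw [pv_foldl_sum (r.take 10) (d+1) (by omega)]
  congr 1
  apply Finset.sum_congr rfl
  intro e he
  rw [pv_take_getD r e (by have := Finset.mem_range.mp he; omega)]

-- the key combinatorial identity: summing the closed form over e ≤ d advances t by one
theorem pv_S_step (prev : List Int) (t : Nat) : ∀ d : Nat,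
    ∑ e ∈ Finset.range (d + 1), pvS prev t e = pvS prev (t + 1) d := by
  intro d
  induction d with
  | zero =>
    simp [pvS]
  | succ d ih =>
    rw [Finset.sum_range_succ, ih]
    have hmain : ∑ e ∈ Finset.range (d+1), ((t + 1 + (d+1) - e).choose ((d+1) - e) : Int) * prev.getD e 0
        = (∑ e ∈ Finset.range (d+1), ((t + 1 + d - e).choose (d - e) : Int) * prev.getD e 0)
          + ∑ e ∈ Finset.range (d+1), ((t + (d+1) - e).choose ((d+1) - e) : Int) * prev.getD e 0 := by
      rw [← Finset.sum_add_distrib]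
      apply Finset.sum_congr rfl
      intro e he
      have he' : e ≤ d := by have := Finset.mem_range.mp he; omega
      have ha : t + 1 + (d+1) - e = (t + 1 + d - e) + 1 := by omega
      have hb : (d+1) - e = (d - e) + 1 := by omega
      have hc : t + (d+1) - e = t + 1 + d - e := by omega
      rw [ha, hb, hc, Nat.choose_succ_succ]
      push_cast
      ring
    unfold pvS
    rw [Finset.sum_range_succ (n := d+1), Finset.sum_range_succ (n := d+1), hmain]
    simp only [Nat.sub_self, Nat.choose_zero_right, Nat.cast_one]
    ring

-- characterization of the t-th generated row (entry d < 10)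
theorem pv_pow_getD (prev : List Int) (hp : 10 ≤ prev.length) :
    ∀ (t : Nat) (d : Nat), d < 10 →
    (pvPow prev t).getD d 0 = PySem.Int.mod (pvS prev t d) pvMod := by
  intro t
  induction t with
  | zero =>
    intro d hd
    rw [pvPow, pv_nextR_getD prev hp d hd]
    congr 1
    unfold pvS
    apply Finset.sum_congr rfl
    intro e he
    have he' : e ≤ d := by have := Finset.mem_range.mp he; omega
    rw [show 0 + d - e = d - e from by omega, Nat.choose_self]
    simp
  | succ t ih =>
    intro d hd
    rw [pvPow, pv_nextR_getD (pvPow prev t) (by rw [pv_pow_len prev hp t]) d hd]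
    have hpos : (0:Int) < pvMod := by decide
    have hcong : ∑ e ∈ Finset.range (d+1), (pvPow prev t).getD e 0
        = ∑ e ∈ Finset.range (d+1), PySem.Int.mod (pvS prev t e) pvMod := by
      apply Finset.sum_congr rfl
      intro e he
      exact ih e (by have := Finset.mem_range.mp he; omega)
    rw [hcong]
    rw [PySem.Int.mod_eq_emod_of_pos hpos]
    have hmods : (∑ e ∈ Finset.range (d+1), PySem.Int.mod (pvS prev t e) pvMod) % pvMod
        = (∑ e ∈ Finset.range (d+1), pvS prev t e) % pvMod := by
      rw [Finset.sum_congr rfl (fun e _ => PySem.Int.mod_eq_emod_of_pos hpos (a := pvS prev t e))]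
      exact (Finset.sum_int_mod _ _ _).symm
    rw [hmods, pv_S_step prev t d, ← PySem.Int.mod_eq_emod_of_pos hpos]

-- the column-9 sums of the generated block
theorem pv_gen_col9 (prev : List Int) (hp : 10 ≤ prev.length) (k : Nat) :
    ((pvGen prev k).map (fun r => PySem.List.pyGetD r 9 0)).sum
    = ∑ t ∈ Finset.range k, PySem.Int.mod (pvS prev t 9) pvMod := by
  rw [pv_gen_eq_pow k prev, List.map_map]
  simp only [Function.comp_def]
  rw [pv_list_range_sum (fun t => PySem.List.pyGetD (pvPow prev t) 9 0) k]
  apply Finset.sum_congr rfl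
  intro t _
  show PySem.List.pyGetD (pvPow prev t) 9 0 = _
  rw [show (9:Int) = ((9:Nat):Int) from by norm_cast, PySem.List.pyGetD_natCast]
  exact pv_pow_getD prev hp t 9 (by omega)

-- B's inner fold (one closed-form row entry) equals mod (pvS prev t 9) for j = t+1
theorem pv_b_row9 (prev : List Int) (t : Nat) :
    PySem.Int.mod
      ((PySem.List.pyRange 0 10 1).foldl
        (fun s e => s + (((((t:Int)+1) + 8 - e).toNat.choose (9 - e).toNat : Nat) : Int)
                        * PySem.List.pyGetD prev e 0) 0) pvMod
    = PySem.Int.mod (pvS prev t 9) pvMod := by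
  have h10 : PySem.List.pyRange 0 10 1 = (List.range 10).map (fun (k : Nat) => (k : Int)) := by
    rw [show (10:Int) = ((10:Nat):Int) by norm_cast, PySem.List.pyRange_zero_nat]
  rw [h10, List.foldl_map]
  rw [PySem.List.foldl_add (l := List.range 10)
    (g := fun (e : Nat) => (((((t:Int)+1) + 8 - (e:Int)).toNat.choose (9 - (e:Int)).toNat : Nat) : Int)
                        * PySem.List.pyGetD prev (e:Int) 0) (a := 0)]
  rw [pv_list_range_sum _ 10, zero_add]
  congr 1
  unfold pvS
  apply Finset.sum_congr rfl
  intro e he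
  have he9 : e ≤ 9 := by have := Finset.mem_range.mp he; omega
  rw [PySem.List.pyGetD_natCast]
  have hA : (((t:Int)+1) + 8 - (e:Int)).toNat = t + 9 - e := by omega
  have hB : ((9:Int) - (e:Int)).toNat = 9 - e := by omega
  rw [hA, hB]

-- B's outer fold: accumulate (row9 - 1) over j = 1..k
theorem pv_b_outer (g : Int → Int) (k : Nat) (a : Int) :
    (PySem.List.pyRange 1 ((k:Int) + 1) 1).foldl (fun acc j => acc + (g j - 1)) a
    = a + (∑ t ∈ Finset.range k, g ((t:Int) + 1)) - k := by
  rw [PySem.List.pyRange_one 1 ((k:Int)+1)]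
  have hc : (((k:Int) + 1) - 1).toNat = k := by omega
  rw [hc, List.foldl_map]
  rw [PySem.List.foldl_add (l := List.range k) (g := fun (t : Nat) => g (1 + (t:Int)) - 1) (a := a)]
  rw [pv_list_range_sum (fun t => g (1 + (t:Int)) - 1) k]
  rw [Finset.sum_sub_distrib]
  simp only [Finset.sum_const, Finset.card_range, nsmul_eq_mul, mul_one]
  rw [Finset.sum_congr rfl (fun t _ => by rw [add_comm (1:Int) (t:Int)] :
    ∀ t ∈ Finset.range k, g (1 + (t:Int)) = g ((t:Int) + 1))]
  ring

-- B's cached-rows fold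
theorem pv_b_cached (memo : List (List Int)) (m : Nat) (hm : m ≤ memo.length) :
    (PySem.List.pyRange 0 ((m:Nat) : Int) 1).foldl
      (fun a i => a + (PySem.List.pyGetD (PySem.List.pyGetD memo i []) 9 0 - 1)) 0
    = ((memo.take m).map (fun r => PySem.List.pyGetD r 9 0)).sum - m := by
  have hcong : (PySem.List.pyRange 0 ((m:Nat) : Int) 1).foldl
      (fun a i => a + (PySem.List.pyGetD (PySem.List.pyGetD memo i []) 9 0 - 1)) 0
      = (PySem.List.pyRange 0 ((m:Nat) : Int) 1).foldl
      (fun a i => a + (PySem.List.pyGetD (PySem.List.pyGetD (memo.take m) i []) 9 0 - 1)) 0 := by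
    apply PySem.List.foldl_congr_mem
    intro acc i hi
    have hi' := (PySem.List.mem_pyRange_one).mp hi
    have h0 : PySem.List.pyGetD memo i [] = PySem.List.pyGetD (memo.take m) i [] := by
      rw [PySem.List.pyGetD_of_nonneg memo ([] : List Int) hi'.1,
          PySem.List.pyGetD_of_nonneg (memo.take m) ([] : List Int) hi'.1]
      have : i.toNat < m := by omega
      simp [List.getD, this]
    rw [h0]
  rw [hcong]
  have hlen : ((m:Nat) : Int) = ((memo.take m).length : Int) := by simp [List.length_take]; omega
  rw [hlen]
  rw [PySem.List.foldl_pyRange_zero_pyGetD' (memo.take m) ([] : List Int)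
    (fun a r => a + (PySem.List.pyGetD r 9 0 - 1)) 0]
  rw [PySem.List.foldl_add (l := memo.take m) (g := fun r => PySem.List.pyGetD r 9 0 - 1) (a := 0)]
  have : ((memo.take m).map (fun r => PySem.List.pyGetD r 9 0 - 1)).sum
      = ((memo.take m).map (fun r => PySem.List.pyGetD r 9 0)).sum - (memo.take m).length := by
    induction (memo.take m) with
    | nil => simp
    | cons x xs ih => simp [ih]; ring
  rw [this]
  simp [List.length_take]

theorem pv_getLast_pyGetD (memo : List (List Int)) (hm : memo ≠ []) :
    PySem.List.pyGetD memo ((memo.length : Int) - 1) [] = memo.getLast hm := by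
  have hlen : 0 < memo.length := List.length_pos_iff.mpr hm
  rw [show ((memo.length : Int) - 1) = (((memo.length - 1 : Nat)) : Int) from by omega,
      PySem.List.pyGetD_natCast]
  rw [List.getLast_eq_getElem]
  simp [List.getD, List.getElem?_eq_getElem (show memo.length - 1 < memo.length by omega)]

theorem pv_base_row' : (PySem.List.pyRange 0 10 1).foldl
    (fun r d => PySem.List.pySetD r d 1) pvZero = List.replicate 10 (1:Int) := by decide

set_option maxHeartbeats 1600000 in
theorem pv_main (len_N : Int) (memo : List (List Int)) (hpre : Pre_dp_dec len_N memo) :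
    dp_dec len_N memo = dp_dec_alt len_N memo := by
  obtain ⟨hpre1, hpre2⟩ := hpre
  have hrow : ∀ (k : Nat) (hk : k < memo.length), (k : Int) ≤ len_N → 10 ≤ memo[k].length := by
    intro k hk hkL
    have hmem : (((0:Int) + (k:Int)), memo[k]) ∈ PySem.List.enumerate memo 0 :=
      (PySem.List.mem_enumerate_iff memo 0 _).mpr ⟨k, hk, rfl⟩
    have := hpre2 _ hmem (by simpa using hkL)
    simpa using this
  by_cases hL : len_N < 0
  · -- len_N < 0 : both sides return 0 (memo ≠ [] under Pre_)
    have hm : memo ≠ [] := by intro h; have := hpre1 h; omega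
    have hmlen : 0 < memo.length := List.length_pos_iff.mpr hm
    have hne0 : ¬((memo.length : Int) = 0) := by
      intro h; have : memo.length = 0 := by exact_mod_cast h
      omega
    simp only [dp_dec, PySem.List.len_eq]
    rw [show PySem.List.pyRange 0 (len_N + 1) 1 = [] from PySem.List.pyRange_one_eq_nil (by omega)]
    simp only [List.foldl_nil, dp_dec_alt, PySem.List.len_eq, if_neg hne0]
    rw [show min ((memo.length:Int)) (len_N + 1) = len_N + 1 from by omega]
    rw [show PySem.List.pyRange 0 (len_N + 1) 1 = [] from PySem.List.pyRange_one_eq_nil (by omega)]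
    rw [show PySem.List.pyRange 1 (len_N + 1 - (memo.length:Int) + 1) 1 = [] from
      PySem.List.pyRange_one_eq_nil (by omega)]
    simp
    decide
  · rw [not_lt] at hL
    by_cases hm : memo = []
    · -- memo = [] : seed row is the all-ones base row
      subst hm
      set k' := len_N.toNat with hk'
      -- A side
      simp only [dp_dec, PySem.List.len_eq]
      rw [pv_appendconst]
      simp only [List.length_nil, Nat.cast_zero, List.nil_append, if_true,
        PySem.List.length_pyRange_one]
      have hn1 : (len_N + 1 - 0).toNat = k' + 1 := by omega
      rw [hn1, List.replicate_succ]
      have hbase := pv_frame (PySem.List.pyRange 0 10 1)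
        (fun m d => pvSet2 m 0 d 1) (fun r d => PySem.List.pySetD r d 1)
        [] (List.replicate k' pvZero)
        (fun r d _ => by
          simp only [List.nil_append, pvSet2, PySem.List.pyGetD_zero_cons]
          rw [show (0:Int) = ((0:Nat):Int) by norm_cast, PySem.List.pySetD_natCast]
          simp) pvZero
      simp only [List.nil_append] at hbase
      rw [hbase, pv_base_row']
      have hdp := pv_dp_fold k' [List.replicate 10 (1:Int)] (by simp)
        (by simp)
      simp only [List.length_cons, List.length_nil, Nat.zero_add, Nat.cast_one,
        List.getLast_singleton] at hdp
      rw [show max 1 (0:Int) = 1 from by norm_num]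
      rw [show len_N + 1 = (1:Int) + (k' : Int) from by omega]
      rw [show List.replicate 10 (1:Int) :: List.replicate k' pvZero
          = [List.replicate 10 (1:Int)] ++ List.replicate k' pvZero from by simp]
      rw [hdp]
      have hfin := pv_finalA ([List.replicate 10 (1:Int)] ++ pvGen (List.replicate 10 (1:Int)) k') (k' + 1)
        (by simp [pv_gen_len])
      rw [show ((1:Int) + (k' : Int)) = (((k' + 1 : Nat)) : Int) from by push_cast; ring]
      rw [hfin, List.take_of_length_le (by simp [pv_gen_len])]
      rw [List.map_append, List.sum_append]
      rw [show ([List.replicate 10 (1:Int)].map (fun r => PySem.List.pyGetD r 9 0)).sum = 1 from by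
        decide]
      rw [pv_gen_col9 (List.replicate 10 (1:Int)) (by simp) k']
      -- B side
      simp only [dp_dec_alt, PySem.List.len_eq, List.length_nil, Nat.cast_zero]
      rw [show min (0:Int) (len_N + 1) = 0 from by omega]
      rw [show PySem.List.pyRange 0 0 1 = [] from PySem.List.pyRange_one_eq_nil (by omega)]
      simp only [List.foldl_nil, if_pos hL, if_true]
      rw [show PySem.List.pyGetD (List.replicate 10 (1:Int)) 9 0 = 1 from by decide]
      rw [show len_N + 1 - 1 + 1 = (k' : Int) + 1 from by omega]
      rw [pv_b_outer (fun j => PySem.Int.mod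
          ((PySem.List.pyRange 0 10 1).foldl
            (fun s e => s + ((j + 8 - e).toNat.choose (9 - e).toNat : Int)
                            * PySem.List.pyGetD (List.replicate 10 (1:Int)) e 0) 0) pvMod) k']
      rw [Finset.sum_congr rfl (fun t _ => pv_b_row9 (List.replicate 10 (1:Int)) t)]
      refine congrArg (fun z => PySem.Int.mod z pvMod) ?_
      push_cast
      ring
    · -- memo ≠ []
      have hmlen : 0 < memo.length := List.length_pos_iff.mpr hm
      have hne0 : ¬((memo.length : Int) = 0) := by
        intro h; have : memo.length = 0 := by exact_mod_cast h
        omega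
      have hgl : PySem.List.pyGetD memo ((memo.length : Int) - 1) [] = memo.getLast hm :=
        pv_getLast_pyGetD memo hm
      simp only [dp_dec, dp_dec_alt, PySem.List.len_eq, if_neg hne0]
      rw [pv_appendconst]
      simp only [PySem.List.length_pyRange_one]
      rw [max_eq_right (show (1:Int) ≤ (memo.length:Int) from by exact_mod_cast hmlen)]
      by_cases hsm : (memo.length : Int) ≤ len_N
      · -- generated block is nonempty
        set k := (len_N + 1 - (memo.length:Int)).toNat with hk
        have hg10 : 10 ≤ (memo.getLast hm).length := by
          rw [List.getLast_eq_getElem]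
          exact hrow (memo.length - 1) (by omega) (by omega)
        -- A side
        have hdp := pv_dp_fold k memo hm hg10
        rw [show (memo.length : Int) + (k : Int) = len_N + 1 from by omega] at hdp
        rw [hdp]
        have hfin := pv_finalA (memo ++ pvGen (memo.getLast hm) k) (len_N + 1).toNat
          (by simp [pv_gen_len]; omega)
        rw [show len_N + 1 = (((len_N + 1).toNat : Nat) : Int) from by omega]
        rw [hfin, List.take_of_length_le (by simp [pv_gen_len]; omega)]
        rw [List.map_append, List.sum_append, pv_gen_col9 (memo.getLast hm) hg10 k]
        -- B side
        rw [show min ((memo.length:Int)) (((len_N + 1).toNat : Nat) : Int) = ((memo.length : Nat) : Int) from by omega]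
        rw [pv_b_cached memo memo.length le_rfl, List.take_length]
        rw [hgl]
        rw [show (((len_N + 1).toNat : Nat) : Int) - (memo.length:Int) + 1 = (k : Int) + 1 from by omega]
        rw [pv_b_outer (fun j => PySem.Int.mod
            ((PySem.List.pyRange 0 10 1).foldl
              (fun s e => s + ((j + 8 - e).toNat.choose (9 - e).toNat : Int)
                              * PySem.List.pyGetD (memo.getLast hm) e 0) 0) pvMod) k]
        rw [Finset.sum_congr rfl (fun t _ => pv_b_row9 (memo.getLast hm) t)]
        refine congrArg (fun z => PySem.Int.mod z pvMod) ?_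
        have hcnt : (((len_N + 1).toNat : Nat) : Int) = (memo.length : Int) + (k : Int) := by omega
        rw [hcnt]
        ring
      · -- no generated rows: len_N < memo.length
        rw [show PySem.List.pyRange ((memo.length:Int)) (len_N + 1) 1 = [] from
          PySem.List.pyRange_one_eq_nil (by omega)]
        rw [show (len_N + 1 - (memo.length:Int)).toNat = 0 from by omega]
        simp only [List.replicate_zero, List.append_nil, List.foldl_nil]
        have hfin := pv_finalA memo (len_N + 1).toNat (by omega)
        rw [show len_N + 1 = (((len_N + 1).toNat : Nat) : Int) from by omega]
        rw [hfin]
        -- B side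
        rw [show min ((memo.length:Int)) (((len_N + 1).toNat : Nat) : Int) = (((len_N + 1).toNat : Nat) : Int) from by omega]
        rw [pv_b_cached memo (len_N + 1).toNat (by omega)]
        rw [show PySem.List.pyRange 1 ((((len_N + 1).toNat : Nat) : Int) - (memo.length:Int) + 1) 1 = [] from
          PySem.List.pyRange_one_eq_nil (by omega)]
        simp

-- ===== VERDICT (by name: the statement is the Claim_ definition above) =====
theorem dp_dec_spec : Claim_equal_dp_dec := by
  intro len_N memo _ hpre
  unfold Spec_dp_dec
  exact pv_main len_N memo hpre
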